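-- pv_equiv track=rewrite | github.com/izanbf1803/tuenti10 | 13/13.py | solve
-- ===== SOURCE A (Python) =====
-- INF = 2**62+1
--
-- def simulate(n, h0, square):
--     h = h0
--     ans = (n if square else n+1) * n * h
--     h -= 2
--     step = 1
--     while h > 0:
--         border = 0
--         if square:
--             border = 4*(n+2*step) - 4
--         else:
--             border = 2*(n+2*step) + 2*(n+1+2*step) - 4
--
--         ans += border * h
--         if ans >= INF:
--             return INF
--
--         if step % 2 == 1:
--             h += 1
--         else:
--             h -= 2
--         step += 1
--     return ans
--
-- def solve(P, square):
--     # Binary search maximum height, using smallest central tower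
--     l = 3
--     r = INF
--     h = 0
--     while l <= r:
--         m = (l+r)//2
--         s = simulate(1, m, square)
--         if s <= P:
--             h = m
--             l = m+1
--         else:
--             r = m-1
--
--     if h == 0: # no solution
--         return (0, 0)
--
--     # Now we have a fixed height, so we binary search maximum central tower
--     l = 1
--     r = INF
--     max_packs = 0
--     while l <= r:
--         m = (l+r)//2
--         s = simulate(m, h, square)
--         if s <= P:
--             max_packs = s
--             l = m+1
--         else:
--             r = m-1
--
--     return (h, max_packs)
-- ===== SOURCE B (Python) =====
-- # B: closed-form layered-sum instead of A's iterative simulate, and an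
-- # accumulator-free recursive bisection helper used for both searches.
-- INF = 2**62 + 1
--
-- def _sim(n, h0, square):
--     # exact value of A's simulate: base plus a closed-form polynomial for
--     # the border layers, capped at INF once the loop has run.
--     c = 4 if square else 2
--     base = (n if square else n + 1) * n * h0
--     if h0 <= 2:
--         return base
--     d = h0 - 2
--     u = 4 * n + 16 - c
--     full = base + u * d * (d + 2) + 4 * d * d - 12 * d + 16 * ((d * d * d - d) // 3)
--     return INF if full >= INF else full
--
-- def _last_true(pred, lo, hi):
--     # greatest m in [lo, hi] with pred(m); lo - 1 if none
--     if lo > hi: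
--         return lo - 1
--     m = (lo + hi) // 2
--     return _last_true(pred, m + 1, hi) if pred(m) else _last_true(pred, lo, m - 1)
--
-- def solve(P, square):
--     h = _last_true(lambda m: _sim(1, m, square) <= P, 3, INF)
--     if h < 3:
--         return (0, 0)
--     n = _last_true(lambda m: _sim(m, h, square) <= P, 1, INF)
--     return (h, _sim(n, h, square) if n >= 1 else 0)
-- ===== Notes on version B (the rewrite author's own statement) =====
-- stated objective: faster
-- what changed: simulate's layer-by-layer while loop is replaced by a closed-form polynomial (sums of k and k^2 folded into one formula, capped at INF), and both accumulator-carrying binary-search loops are replaced by one accumulator-free recursive bisection helper.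
import Mathlib
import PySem

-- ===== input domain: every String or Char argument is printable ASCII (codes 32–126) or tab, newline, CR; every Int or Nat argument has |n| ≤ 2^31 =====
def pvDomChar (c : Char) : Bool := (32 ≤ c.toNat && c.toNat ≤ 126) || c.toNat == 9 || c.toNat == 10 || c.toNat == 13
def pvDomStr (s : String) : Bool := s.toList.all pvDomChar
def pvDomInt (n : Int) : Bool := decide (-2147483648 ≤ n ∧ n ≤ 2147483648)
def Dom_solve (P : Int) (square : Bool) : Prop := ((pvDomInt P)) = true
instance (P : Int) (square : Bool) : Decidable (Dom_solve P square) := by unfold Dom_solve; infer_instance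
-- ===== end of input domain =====

-- B replaces A's O(h0) layer-by-layer simulate loop with a closed-form polynomial
-- and both accumulator-carrying binary-search loops with one recursive bisection helper.

-- ===== PORT A =====
def pvINF : Int := 2^62 + 1

-- the border of layer `step` (A computes this expression inline in its loop)
def borderA (n : Int) (square : Bool) (step : Int) : Int :=
  if square then 4*(n+2*step) - 4 else 2*(n+2*step) + 2*(n+1+2*step) - 4

-- A's while loop; the Nat argument is a fuel bound (always passed large enough)
def simLoop (n : Int) (square : Bool) : Nat → Int → Int → Int → Int
  | 0, _, _, ans => ans
  | fuel+1, h, step, ans =>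
    if 0 < h then
      let ans' := ans + borderA n square step * h
      if pvINF ≤ ans' then pvINF
      else if PySem.Int.mod step 2 = 1 then simLoop n square fuel (h+1) (step+1) ans'
      else simLoop n square fuel (h-2) (step+1) ans'
    else ans

def simulate (n h0 : Int) (square : Bool) : Int :=
  simLoop n square (2*h0 + 4).toNat (h0 - 2) 1 ((if square then n else n+1) * n * h0)

-- A's first binary-search loop (fuel bound always passed large enough)
def bs1 (P : Int) (square : Bool) : Nat → Int → Int → Int → Int
  | 0, _, _, h => h
  | fuel+1, l, r, h =>
    if l ≤ r then
      let m := PySem.Int.floordiv (l+r) 2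
      if simulate 1 m square ≤ P then bs1 P square fuel (m+1) r m else bs1 P square fuel l (m-1) h
    else h

-- A's second binary-search loop, accumulating the simulate value
def bs2 (P : Int) (square : Bool) (hh : Int) : Nat → Int → Int → Int → Int
  | 0, _, _, acc => acc
  | fuel+1, l, r, acc =>
    if l ≤ r then
      let m := PySem.Int.floordiv (l+r) 2
      let s := simulate m hh square
      if s ≤ P then bs2 P square hh fuel (m+1) r s else bs2 P square hh fuel l (m-1) acc
    else acc

def solve (P : Int) (square : Bool) : Int × Int :=
  let h := bs1 P square pvINF.toNat 3 pvINF 0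
  if h = 0 then (0, 0)
  else (h, bs2 P square h pvINF.toNat 1 pvINF 0)

-- ===== PORT B =====
def simCF (n h0 : Int) (square : Bool) : Int :=
  let c : Int := if square then 4 else 2
  let base := (if square then n else n + 1) * n * h0
  if h0 ≤ 2 then base
  else
    let d := h0 - 2
    let u := 4*n + 16 - c
    let full := base + u*d*(d+2) + 4*d*d - 12*d + 16 * PySem.Int.floordiv (d*d*d - d) 3
    if pvINF ≤ full then pvINF else full

-- B's recursive bisection (fuel bound always passed large enough)
def lastTrue (p : Int → Bool) : Nat → Int → Int → Int
  | 0, lo, _ => lo - 1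
  | fuel+1, lo, hi =>
    if hi < lo then lo - 1
    else
      let m := PySem.Int.floordiv (lo+hi) 2
      if p m then lastTrue p fuel (m+1) hi else lastTrue p fuel lo (m-1)

def solve_alt (P : Int) (square : Bool) : Int × Int :=
  let h := lastTrue (fun m => decide (simCF 1 m square ≤ P)) pvINF.toNat 3 pvINF
  if h < 3 then (0, 0)
  else
    let n := lastTrue (fun m => decide (simCF m h square ≤ P)) pvINF.toNat 1 pvINF
    (h, if 1 ≤ n then simCF n h square else 0)

-- ===== PRECONDITION & SPEC =====
def Spec_solve (P : Int) (square : Bool) (out : Int × Int) : Prop := out = solve_alt P square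
instance (P : Int) (square : Bool) (out : Int × Int) : Decidable (Spec_solve P square out) := by unfold Spec_solve; infer_instance

-- ===== CLAIM (what is proved, stated in full; the proofs are below) =====
def Claim_equal_solve : Prop := ∀ (P : Int) (square : Bool), Dom_solve P square → Spec_solve P square (solve P square)

-- ===== LEMMAS AND PROOFS =====

-- remaining border sum of A's loop, entered at an odd step 2k-1 with current height d
def RemR (n : Int) (square : Bool) (k : Int) : Nat → Int
  | 0 => 0
  | (d+1) => borderA n square (2*k-1) * ((d:Int)+1) + borderA n square (2*k) * ((d:Int)+2)
             + RemR n square (k+1) d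

theorem borderA_nonneg (n : Int) (square : Bool) (step : Int) (hn : 1 ≤ n) (hs : 1 ≤ step) :
    0 ≤ borderA n square step := by
  unfold borderA; split_ifs <;> omega

theorem RemR_nonneg (n : Int) (square : Bool) (k : Int) (d : Nat) (hn : 1 ≤ n) (hk : 1 ≤ k) :
    0 ≤ RemR n square k d := by
  induction d generalizing k with
  | zero => simp [RemR]
  | succ d ih =>
    have h1 := borderA_nonneg n square (2*k-1) hn (by omega)
    have h2 := borderA_nonneg n square (2*k) hn (by omega)
    have h3 := ih (k+1) (by omega)
    have p1 : 0 ≤ borderA n square (2*k-1) * ((d:Int)+1) := by positivity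
    have p2 : 0 ≤ borderA n square (2*k) * ((d:Int)+2) := by positivity
    simp only [RemR]; omega

theorem mod_two_odd (k : Int) : PySem.Int.mod (2*k-1) 2 = 1 := by
  rw [PySem.Int.mod_eq_emod_of_pos (by norm_num)]; omega

theorem mod_two_even (k : Int) : PySem.Int.mod (2*k) 2 = 0 := by
  rw [PySem.Int.mod_eq_emod_of_pos (by norm_num)]; omega

theorem simLoop_odd (d : Nat) : ∀ (fuel : Nat) (k ans n : Int) (square : Bool), 1 ≤ n → 1 ≤ k →
    2*d + 1 ≤ fuel →
    simLoop n square fuel (d : Int) (2*k - 1) ans =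
      if d = 0 then ans
      else if pvINF ≤ ans + RemR n square k d then pvINF else ans + RemR n square k d := by
  induction d with
  | zero =>
    intro fuel k ans n square hn hk hf
    obtain ⟨f, rfl⟩ : ∃ f, fuel = f + 1 := ⟨fuel - 1, by omega⟩
    rw [simLoop]; simp
  | succ d ih =>
    intro fuel k ans n square hn hk hf
    obtain ⟨f, rfl⟩ : ∃ f, fuel = f + 1 + 1 := ⟨fuel - 2, by omega⟩
    have hb1 := borderA_nonneg n square (2*k-1) hn (by omega)
    have hb2 := borderA_nonneg n square (2*k) hn (by omega)
    have hrem := RemR_nonneg n square (k+1) d hn (by omega)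
    have hp1 : 0 ≤ borderA n square (2*k-1) * ((d:Int)+1) := by positivity
    have hp2 : 0 ≤ borderA n square (2*k) * ((d:Int)+2) := by positivity
    have hcast : ((d+1 : Nat) : Int) = (d:Int) + 1 := by push_cast; ring
    have hrem_eq : RemR n square k (d+1)
        = borderA n square (2*k-1) * ((d:Int)+1) + borderA n square (2*k) * ((d:Int)+2)
          + RemR n square (k+1) d := rfl
    rw [simLoop, hcast]
    have hpos : (0:Int) < (d:Int) + 1 := by omega
    simp only [if_pos hpos]
    set a1 := ans + borderA n square (2*k-1) * ((d:Int)+1) with ha1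
    by_cases hc1 : pvINF ≤ a1
    · -- capped at the odd step
      simp only [if_pos hc1, if_true]
      have : pvINF ≤ ans + RemR n square k (d+1) := by rw [hrem_eq]; omega
      simp only [if_neg (by omega : ¬(d + 1 = 0)), if_pos this]
    · simp only [if_neg hc1, mod_two_odd k]
      -- even step: height (d:Int)+1+1 = d+2, step 2k-1+1 = 2k
      have e1 : (d:Int) + 1 + 1 = (d:Int) + 2 := by ring
      have e2 : 2*k - 1 + 1 = 2*k := by ring
      rw [simLoop, e1, e2]
      have hpos2 : (0:Int) < (d:Int) + 2 := by omega
      simp only [if_pos hpos2]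
      set a2 := a1 + borderA n square (2*k) * ((d:Int)+2) with ha2
      by_cases hc2 : pvINF ≤ a2
      · simp only [if_pos hc2, if_true]
        have : pvINF ≤ ans + RemR n square k (d+1) := by rw [hrem_eq]; omega
        simp only [if_neg (by omega : ¬(d + 1 = 0)), if_pos this]
      · simp only [if_neg hc2, mod_two_even k]
        simp only [if_neg (by norm_num : ¬ ((0:Int) = 1))]
        have e3 : (d:Int) + 2 - 2 = (d:Int) := by ring
        have e4 : 2*k + 1 = 2*(k+1) - 1 := by ring
        rw [e3, e4, ih f (k+1) a2 n square hn (by omega) (by omega)]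
        by_cases hd : d = 0
        · subst hd
          simp only [if_pos rfl, if_neg (by omega : ¬(0 + 1 = 0))]
          have : RemR n square k (0+1) = a2 - ans := by
            rw [hrem_eq]; simp [RemR]; omega
          rw [this]
          simp only [show ans + (a2 - ans) = a2 by ring, if_neg hc2, if_true]
        · simp only [if_neg hd, if_neg (by omega : ¬(d + 1 = 0))]
          have : ans + RemR n square k (d+1) = a2 + RemR n square (k+1) d := by
            rw [hrem_eq]; omega
          rw [this]
          simp only [if_true]

theorem dvd3_cube (d : Int) : (3:Int) ∣ d*d*d - d := by
  obtain ⟨q, r, hqr, hr⟩ : ∃ q r, d = 3*q + r ∧ (r = 0 ∨ r = 1 ∨ r = 2) :=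
    ⟨d / 3, d % 3, by omega, by omega⟩
  subst hqr
  rcases hr with rfl | rfl | rfl
  · exact ⟨9*q*q*q - q, by ring⟩
  · exact ⟨9*q*q*q + 9*q*q + 2*q, by ring⟩
  · exact ⟨9*q*q*q + 18*q*q + 11*q + 2, by ring⟩

theorem RemR_closed (d : Nat) : ∀ (n k : Int) (square : Bool),
    RemR n square k d =
      (4*n + 16*k - (if square then 4 else 2)) * (d:Int) * ((d:Int)+2)
        + 4*(d:Int)*(d:Int) - 12*(d:Int)
        + 16 * PySem.Int.floordiv ((d:Int)*(d:Int)*(d:Int) - (d:Int)) 3 := by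
  induction d with
  | zero =>
    intro n k square
    simp [RemR, PySem.Int.floordiv]
  | succ d ih =>
    intro n k square
    obtain ⟨a, ha⟩ := dvd3_cube (d:Int)
    obtain ⟨b, hb⟩ := dvd3_cube ((d:Int)+1)
    have hfa : PySem.Int.floordiv ((d:Int)*(d:Int)*(d:Int) - (d:Int)) 3 = a := by
      rw [PySem.Int.floordiv_eq_ediv_of_pos (by norm_num), ha]
      exact Int.mul_ediv_cancel_left a (by norm_num)
    have hfb : PySem.Int.floordiv (((d:Int)+1)*((d:Int)+1)*((d:Int)+1) - ((d:Int)+1)) 3 = b := by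
      rw [PySem.Int.floordiv_eq_ediv_of_pos (by norm_num), hb]
      exact Int.mul_ediv_cancel_left b (by norm_num)
    have hab : b = a + (d:Int)*(d:Int) + (d:Int) := by
      have h3 : 3*b = 3*a + 3*((d:Int)*(d:Int) + (d:Int)) := by
        have : ((d:Int)+1)*((d:Int)+1)*((d:Int)+1) - ((d:Int)+1)
            = ((d:Int)*(d:Int)*(d:Int) - (d:Int)) + 3*((d:Int)*(d:Int) + (d:Int)) := by ring
        omega
      omega
    have hcast : ((d+1 : Nat) : Int) = (d:Int) + 1 := by push_cast; ring
    simp only [RemR, ih, hcast, hfb, hfa, hab, borderA]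
    split_ifs <;> ring

theorem simulate_eq_simCF (n h0 : Int) (square : Bool) (hn : 1 ≤ n) :
    simulate n h0 square = simCF n h0 square := by
  unfold simulate simCF
  by_cases hle : h0 ≤ 2
  · rcases Nat.eq_zero_or_eq_succ_pred (2*h0+4).toNat with hz | hs
    · rw [hz, simLoop]
      simp only [if_pos hle]
    · rw [hs, simLoop]
      simp only [if_neg (by omega : ¬ (0:Int) < h0 - 2), if_pos hle]
  · simp only [if_neg hle]
    have hd : ((h0 - 2).toNat : Int) = h0 - 2 := by omega
    have := simLoop_odd (h0-2).toNat (2*h0+4).toNat 1 ((if square then n else n+1) * n * h0) n square hn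
      (by omega) (by omega)
    rw [hd] at this
    have h2 : 2*(1:Int) - 1 = 1 := by norm_num
    rw [h2] at this
    rw [this, RemR_closed (h0-2).toNat n 1 square, hd]
    have hne : ¬ ((h0-2).toNat = 0) := by omega
    simp only [if_neg hne]
    have hu : 4*n + 16*(1:Int) - (if square then (4:Int) else 2) = 4*n + 16 - (if square then (4:Int) else 2) := by ring_nf
    rw [hu]
    ring_nf

theorem lastTrue_ge (p : Int → Bool) : ∀ (fuel : Nat) (lo hi : Int),
    lo - 1 ≤ lastTrue p fuel lo hi := by
  intro fuel
  induction fuel with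
  | zero => intro lo hi; rw [lastTrue]
  | succ f ih =>
    intro lo hi
    rw [lastTrue]
    by_cases hlr : hi < lo
    · simp [hlr]
    · simp only [if_neg hlr]
      have hm := PySem.Int.floordiv_two_mid_bounds (lo := lo) (hi := hi) (by omega)
      set m := PySem.Int.floordiv (lo+hi) 2 with hmdef
      by_cases hp : p m
      · simp only [if_pos hp]
        have := ih (m+1) hi
        omega
      · simp only [if_neg hp]
        have := ih lo (m-1)
        omega

theorem bs1_eq (P : Int) (square : Bool) : ∀ (fuel : Nat) (l r h : Int), (r + 1 - l).toNat ≤ fuel → 1 ≤ l →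
    bs1 P square fuel l r h =
      (if l ≤ lastTrue (fun m => decide (simCF 1 m square ≤ P)) fuel l r
       then lastTrue (fun m => decide (simCF 1 m square ≤ P)) fuel l r else h) := by
  intro fuel
  induction fuel with
  | zero =>
    intro l r h hN hl
    rw [bs1, lastTrue]
    simp only [if_neg (by omega : ¬ l ≤ l - 1)]
  | succ f ih =>
    intro l r h hN hl
    rw [bs1, lastTrue]
    by_cases hlr : l ≤ r
    · simp only [if_pos hlr, if_neg (by omega : ¬ r < l)]
      have hm := PySem.Int.floordiv_two_mid_bounds (lo := l) (hi := r) (by omega)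
      set m := PySem.Int.floordiv (l+r) 2 with hmdef
      have hsim : simulate 1 m square = simCF 1 m square := simulate_eq_simCF 1 m square (by norm_num)
      by_cases hp : simCF 1 m square ≤ P
      · simp only [hsim, if_pos hp, decide_eq_true hp, if_pos trivial, if_true]
        rw [ih (m+1) r m (by omega) (by omega)]
        have hge := lastTrue_ge (fun m => decide (simCF 1 m square ≤ P)) f (m+1) r
        set t := lastTrue (fun m => decide (simCF 1 m square ≤ P)) f (m+1) r with ht
        by_cases hmt : m + 1 ≤ t
        · simp only [if_pos hmt, if_pos (by omega : l ≤ t)]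
        · simp only [if_neg hmt, if_pos (by omega : l ≤ m)]
          omega
      · simp only [hsim, if_neg hp]
        have hdp : (decide (simCF 1 m square ≤ P)) = false := by simp [hp]
        simp only [hdp, Bool.false_eq_true, if_false]
        exact ih l (m-1) h (by omega) hl
    · simp only [if_neg hlr, if_pos (by omega : r < l)]
      simp only [if_neg (by omega : ¬ l ≤ l - 1)]

theorem bs2_eq (P : Int) (square : Bool) (hh : Int) : ∀ (fuel : Nat) (l r acc : Int), (r + 1 - l).toNat ≤ fuel → 1 ≤ l →
    bs2 P square hh fuel l r acc =
      (if l ≤ lastTrue (fun m => decide (simCF m hh square ≤ P)) fuel l r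
       then simCF (lastTrue (fun m => decide (simCF m hh square ≤ P)) fuel l r) hh square else acc) := by
  intro fuel
  induction fuel with
  | zero =>
    intro l r acc hN hl
    rw [bs2, lastTrue]
    simp only [if_neg (by omega : ¬ l ≤ l - 1)]
  | succ f ih =>
    intro l r acc hN hl
    rw [bs2, lastTrue]
    by_cases hlr : l ≤ r
    · simp only [if_pos hlr, if_neg (by omega : ¬ r < l)]
      have hm := PySem.Int.floordiv_two_mid_bounds (lo := l) (hi := r) (by omega)
      set m := PySem.Int.floordiv (l+r) 2 with hmdef
      have hsim : simulate m hh square = simCF m hh square := simulate_eq_simCF m hh square (by omega)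
      by_cases hp : simCF m hh square ≤ P
      · simp only [hsim, if_pos hp, decide_eq_true hp, if_pos trivial, if_true]
        rw [ih (m+1) r (simCF m hh square) (by omega) (by omega)]
        have hge := lastTrue_ge (fun m => decide (simCF m hh square ≤ P)) f (m+1) r
        set t := lastTrue (fun m => decide (simCF m hh square ≤ P)) f (m+1) r with ht
        by_cases hmt : m + 1 ≤ t
        · simp only [if_pos hmt, if_pos (by omega : l ≤ t)]
        · have htm : t = m := by omega
          simp only [if_neg hmt, if_pos (by omega : l ≤ m), htm]
          split_ifs <;> rfl
      · simp only [hsim, if_neg hp]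
        have hdp : (decide (simCF m hh square ≤ P)) = false := by simp [hp]
        simp only [hdp, Bool.false_eq_true, if_false]
        exact ih l (m-1) acc (by omega) hl
    · simp only [if_neg hlr, if_pos (by omega : r < l)]
      simp only [if_neg (by omega : ¬ l ≤ l - 1)]

-- ===== VERDICT (by name: the statement is the Claim_ definition above) =====
theorem solve_spec : Claim_equal_solve := by
  unfold Claim_equal_solve
  intro P square _
  unfold Spec_solve solve solve_alt
  rw [bs1_eq P square pvINF.toNat 3 pvINF 0 (by norm_num [pvINF]) (by norm_num)]
  have hge := lastTrue_ge (fun m => decide (simCF 1 m square ≤ P)) pvINF.toNat 3 pvINF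
  set t := lastTrue (fun m => decide (simCF 1 m square ≤ P)) pvINF.toNat 3 pvINF with ht
  by_cases h3 : 3 ≤ t
  · simp only [if_pos h3, if_neg (by omega : ¬ t = 0), if_neg (by omega : ¬ t < 3)]
    rw [bs2_eq P square t pvINF.toNat 1 pvINF 0 (by norm_num [pvINF]) (by norm_num)]
  · simp only [if_neg h3, if_pos rfl, if_pos (by omega : t < 3), if_true]
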